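-- pv_equiv track=rewrite | github.com/zhaoluuu/Aether | src/api/handlers/base/request_builder.py | _merge_comma_header_values
-- ===== SOURCE A (Python) =====
-- def _merge_comma_header_values(primary: str, secondary: str) -> str:
--     """合并逗号分隔 header 值并去重，保持 primary 在前。"""
--     seen: set[str] = set()
--     merged: list[str] = []
--
--     def _append(raw: str) -> None:
--         for token in str(raw or "").split(","):
--             token = token.strip()
--             if not token or token in seen:
--                 continue
--             seen.add(token)
--             merged.append(token)
--
--     _append(primary)
--     _append(secondary)
--     return ",".join(merged)
-- ===== SOURCE B (Python) =====
-- def _merge_comma_header_values(primary: str, secondary: str) -> str: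
--     combined = str(primary or "") + "," + str(secondary or "")
--     tokens = [t.strip() for t in combined.split(",") if t.strip()]
--
--     def nub(ts):
--         # keep the head, then recurse on the tail with every later copy of it removed
--         if not ts:
--             return []
--         return [ts[0]] + nub([t for t in ts[1:] if t != ts[0]])
--
--     return ",".join(nub(tokens))
-- ===== Notes on version B (the rewrite author's own statement) =====
-- stated objective: alternative
-- what changed: B builds the full stripped token list in one staged pass over the concatenated string, then deduplicates by a recursive nub that filters every later duplicate of the head out of the tail, instead of A's single accumulation loop with a seen set and per-token membership test.
import Mathlib
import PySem

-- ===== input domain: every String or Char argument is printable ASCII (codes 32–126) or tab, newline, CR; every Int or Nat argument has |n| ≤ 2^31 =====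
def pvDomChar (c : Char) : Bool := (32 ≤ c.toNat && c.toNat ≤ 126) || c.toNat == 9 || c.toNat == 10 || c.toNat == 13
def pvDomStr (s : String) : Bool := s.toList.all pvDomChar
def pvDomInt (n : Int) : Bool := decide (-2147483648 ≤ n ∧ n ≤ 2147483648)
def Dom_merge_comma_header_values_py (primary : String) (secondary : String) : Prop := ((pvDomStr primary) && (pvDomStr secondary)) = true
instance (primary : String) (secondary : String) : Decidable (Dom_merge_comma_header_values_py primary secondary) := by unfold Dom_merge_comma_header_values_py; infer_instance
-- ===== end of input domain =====

-- B first builds the whole stripped token list from the concatenated string in staged passes, then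
-- deduplicates with a recursive nub that removes later copies of the head from the tail, replacing
-- A's single accumulation loop with a seen set and per-token membership test; same result, no seen set.

-- ===== PORT A =====
-- the body of the inner helper _append's loop: token = tok.strip(); skip empty or seen; else add to seen and merged
def mchvA_step (st : PySem.Set (List Char) × List (List Char)) (tok : List Char) :
    PySem.Set (List Char) × List (List Char) :=
  let token := PySem.Chars.strip tok
  if (token == []) || PySem.Set.contains st.1 token then st
  else (PySem.Set.add st.1 token, st.2 ++ [token])

-- _append(raw): for token in str(raw or "").split(","): …   ('raw or ""' is raw for a str argument)
def mchvA_append (raw : String) (st : PySem.Set (List Char) × List (List Char)) :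
    PySem.Set (List Char) × List (List Char) :=
  (PySem.Chars.splitOn raw.toList [',']).foldl mchvA_step st

def merge_comma_header_values_py (primary : String) (secondary : String) : String :=
  let st0 : PySem.Set (List Char) × List (List Char) := (PySem.Set.empty, [])
  let st1 := mchvA_append primary st0
  let st2 := mchvA_append secondary st1
  String.ofList (PySem.Chars.join [','] st2.2)

-- ===== PORT B =====
-- nub(ts): if not ts: []; else [ts[0]] + nub([t for t in ts[1:] if t != ts[0]])
def mchvNub : List (List Char) → List (List Char)
  | [] => []
  | t :: rest => t :: mchvNub (rest.filter (fun x => !(x == t)))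
termination_by l => l.length
decreasing_by
  simp only [List.length_cons, List.length_unattach]
  exact Nat.lt_succ_of_le (le_trans (List.length_filter_le _ _) (by simp))

def merge_comma_header_values_py_alt (primary : String) (secondary : String) : String :=
  -- str(primary or "") + "," + str(secondary or ""): exact concatenation on the list-of-chars side
  let combined : List Char := primary.toList ++ ',' :: secondary.toList
  -- [t.strip() for t in combined.split(",") if t.strip()]
  let tokens := ((PySem.Chars.splitOn combined [',']).filter
      (fun t => !(PySem.Chars.strip t == []))).map PySem.Chars.strip
  -- ",".join(nub(tokens))
  String.ofList (PySem.Chars.join [','] (mchvNub tokens))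

-- ===== PRECONDITION & SPEC =====
def Spec_merge_comma_header_values_py (primary : String) (secondary : String) (out : String) : Prop := out = merge_comma_header_values_py_alt primary secondary
instance (primary : String) (secondary : String) (out : String) : Decidable (Spec_merge_comma_header_values_py primary secondary out) := by unfold Spec_merge_comma_header_values_py; infer_instance

-- ===== CLAIM (what is proved, stated in full; the proofs are below) =====
def Claim_equal_merge_comma_header_values_py : Prop := ∀ (primary : String) (secondary : String), Dom_merge_comma_header_values_py primary secondary → Spec_merge_comma_header_values_py primary secondary (merge_comma_header_values_py primary secondary)

-- ===== LEMMAS AND PROOFS =====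

-- PySem.Chars.splitOn with a single-char separator is List.splitOnP on equality with that char
theorem mchv_go_eq (c : Char) : ∀ (fuel : Nat) (l cur : List Char) (acc : List (List Char)),
    l.length ≤ fuel →
    PySem.Chars.splitOn.go [c] fuel l cur acc
      = acc.reverse ++ (List.splitOnP (· == c) l).modifyHead (cur.reverse ++ ·) := by
  intro fuel
  induction fuel with
  | zero =>
      intro l cur acc h
      have hl : l = [] := List.eq_nil_of_length_eq_zero (Nat.le_zero.mp h)
      subst hl
      simp [PySem.Chars.splitOn.go, List.splitOnP_nil]
  | succ n ih =>
      intro l cur acc h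
      cases l with
      | nil => simp [PySem.Chars.splitOn.go, List.splitOnP_nil]
      | cons a rest =>
          by_cases hc : a = c
          · subst hc
            have hpre : List.isPrefixOf [a] (a :: rest) = true := by
              simp [List.isPrefixOf]
            rw [PySem.Chars.splitOn.go]
            simp only [hpre, if_true]
            have hdrop : List.drop (List.length [a]) (a :: rest) = rest := rfl
            rw [hdrop, ih rest [] (cur.reverse :: acc) (by simpa using Nat.le_of_succ_le_succ h)]
            simp only [List.splitOnP_cons, beq_self_eq_true, if_true, List.reverse_cons,
              List.append_assoc, List.reverse_nil, List.nil_append, List.singleton_append]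
            cases List.splitOnP (fun x => x == a) rest <;> simp
          · have hpre : List.isPrefixOf [c] (a :: rest) = false := by
              simp [List.isPrefixOf]
              exact fun h' => hc h'.symm
            rw [PySem.Chars.splitOn.go]
            simp only [hpre, Bool.false_eq_true, if_false]
            rw [ih rest (a :: cur) acc (by simpa using Nat.le_of_succ_le_succ h)]
            have hne : List.splitOnP (· == c) rest ≠ [] := List.splitOnP_ne_nil _ _
            rw [List.splitOnP_cons]
            simp only [beq_iff_eq, hc, if_false]
            obtain ⟨x, xs, hx⟩ := List.exists_cons_of_ne_nil hne
            rw [hx]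
            simp

theorem mchv_splitOn_eq (c : Char) (l : List Char) :
    PySem.Chars.splitOn l [c] = List.splitOnP (· == c) l := by
  rw [PySem.Chars.splitOn, mchv_go_eq c (l.length + 1) l [] [] (Nat.le_succ _)]
  have : List.splitOnP (· == c) l ≠ [] := List.splitOnP_ne_nil _ _
  obtain ⟨x, xs, hx⟩ := List.exists_cons_of_ne_nil this
  rw [hx]; simp

theorem mchv_splitOnP_append (c : Char) (a b : List Char) :
    List.splitOnP (· == c) (a ++ c :: b)
      = List.splitOnP (· == c) a ++ List.splitOnP (· == c) b := by
  induction a with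
  | nil => simp [List.splitOnP_cons, List.splitOnP_nil]
  | cons x xs ih =>
      by_cases hx : x = c
      · subst hx
        simp [List.splitOnP_cons, ih]
      · have hne' : List.splitOnP (· == c) xs ≠ [] := List.splitOnP_ne_nil _ _
        simp only [List.cons_append, List.splitOnP_cons, beq_iff_eq, hx, if_false, ih]
        obtain ⟨y, ys, hy⟩ := List.exists_cons_of_ne_nil hne'
        rw [hy]
        simp

-- A's loop, run from a state whose seen set and merged list coincide, keeps them equal
-- and performs exactly a Set.update with the stripped non-empty tokens
theorem mchvA_foldl_eq : ∀ (L : List (List Char)) (s : PySem.Set (List Char)),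
    L.foldl mchvA_step (s, s)
      = (PySem.Set.update s (((L.map PySem.Chars.strip).filter (fun t => !(t == [])))),
         PySem.Set.update s (((L.map PySem.Chars.strip).filter (fun t => !(t == []))))) := by
  intro L
  induction L with
  | nil => intro s; simp [PySem.Set.update]
  | cons t rest ih =>
      intro s
      simp only [List.foldl_cons, List.map_cons, List.filter_cons]
      by_cases hemp : PySem.Chars.strip t = []
      · have : mchvA_step (s, s) t = (s, s) := by
          simp [mchvA_step, hemp]
        rw [this, ih s]
        simp [hemp]
      · by_cases hmem : PySem.Chars.strip t ∈ s
        · have hstep : mchvA_step (s, s) t = (s, s) := by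
            simp [mchvA_step, hmem]
          have hadd : PySem.Set.add s (PySem.Chars.strip t) = s := by
            simp [PySem.Set.add, hmem]
          rw [hstep, ih s]
          rw [if_pos (by simp [hemp]), PySem.Set.update_cons, hadd]
        · have hstep : mchvA_step (s, s) t
              = (PySem.Set.add s (PySem.Chars.strip t), PySem.Set.add s (PySem.Chars.strip t)) := by
            simp [mchvA_step, hemp, hmem, PySem.Set.add]
          rw [hstep, ih (PySem.Set.add s (PySem.Chars.strip t))]
          rw [if_pos (by simp [hemp]), PySem.Set.update_cons]

-- A's seen-set accumulation equals B's nub of the not-yet-seen tokens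
theorem mchvNub_update : ∀ (L : List (List Char)) (s : PySem.Set (List Char)),
    PySem.Set.update s L
      = s ++ mchvNub (L.filter (fun x => !(PySem.Set.contains s x))) := by
  intro L
  induction L with
  | nil => intro s; simp [PySem.Set.update, mchvNub]
  | cons t rest ih =>
      intro s
      rw [PySem.Set.update_cons, List.filter_cons]
      by_cases hmem : t ∈ s
      · have hadd : PySem.Set.add s t = s := by simp [PySem.Set.add, hmem]
        rw [hadd, ih s]
        simp [PySem.Set.contains, hmem]
      · have hadd : PySem.Set.add s t = s ++ [t] := by simp [PySem.Set.add, hmem]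
        have hfe : List.filter (fun x => !(PySem.Set.contains (s ++ [t]) x)) rest
            = List.filter (fun x => !(x == t))
                (List.filter (fun x => !(PySem.Set.contains s x)) rest) := by
          rw [List.filter_filter]
          apply List.filter_congr
          intro x _
          by_cases h1 : x ∈ s <;> by_cases h2 : x = t <;>
            simp [PySem.Set.contains, h1, h2]
        rw [hadd, ih (s ++ [t]), hfe]
        simp [PySem.Set.contains, hmem, mchvNub]

-- ===== VERDICT (by name: the statement is the Claim_ definition above) =====
theorem merge_comma_header_values_py_spec : Claim_equal_merge_comma_header_values_py := by
  intro primary secondary _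
  show merge_comma_header_values_py primary secondary = merge_comma_header_values_py_alt primary secondary
  simp only [merge_comma_header_values_py, merge_comma_header_values_py_alt, mchvA_append]
  rw [mchv_splitOn_eq, mchv_splitOn_eq, mchv_splitOn_eq, mchv_splitOnP_append]
  set P := List.splitOnP (· == ',') primary.toList with hP
  set S := List.splitOnP (· == ',') secondary.toList with hS
  -- push the filter/map comprehension into map-then-filter form
  have hcomm : ∀ (X : List (List Char)),
      (X.filter (fun t => !(PySem.Chars.strip t == []))).map PySem.Chars.strip
        = (X.map PySem.Chars.strip).filter (fun t => !(t == [])) := by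
    intro X
    rw [List.filter_map]
    rfl
  have e0 : ((PySem.Set.empty, []) : PySem.Set (List Char) × List (List Char))
      = (PySem.Set.empty, PySem.Set.empty) := rfl
  have hfoldPE := mchvA_foldl_eq P PySem.Set.empty
  rw [e0, hfoldPE, mchvA_foldl_eq]
  rw [hcomm, List.map_append, List.filter_append]
  -- combine the two updates into a single update on the appended token list, then nub it
  have hupd : ∀ (a b : List (List Char)),
      PySem.Set.update (PySem.Set.update PySem.Set.empty a) b
        = PySem.Set.update PySem.Set.empty (a ++ b) := by
    intro a b
    simp [PySem.Set.update, List.foldl_append]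
  rw [hupd, mchvNub_update]
  simp [PySem.Set.empty, PySem.Set.contains]
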